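-- pv_equiv track=rewrite | github.com/kpharthiban/ask-ara-plus | backend/tools/complexity.py | _find_jargon
-- ===== SOURCE A (Python) =====
-- def _find_jargon(text: str, jargon_map: dict[str, str]) -> list[dict]:
--     """Find glossary jargon terms present in the text.
--
--     Checks multi-word terms first (longer matches take priority),
--     then single-word terms. Case-insensitive matching.
--
--     Returns list of {"term": ..., "simple": ...} dicts.
--     """
--     text_lower = text.lower()
--     found: list[dict] = []
--     matched_spans: list[tuple[int, int]] = []
--
--     # Sort by term length descending so multi-word matches take priority
--     sorted_terms = sorted(jargon_map.items(), key=lambda x: len(x[0]), reverse=True)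
--
--     for formal_lower, simple in sorted_terms:
--         # Skip very short terms (< 3 chars) to avoid false positives
--         if len(formal_lower) < 3:
--             continue
--
--         start = 0
--         while True:
--             idx = text_lower.find(formal_lower, start)
--             if idx == -1:
--                 break
--
--             end = idx + len(formal_lower)
--
--             # Check if this span overlaps with an already-matched span
--             overlaps = any(
--                 not (end <= ms or idx >= me)
--                 for ms, me in matched_spans
--             )
--             if not overlaps:
--                 found.append({"term": formal_lower, "simple": simple})
--                 matched_spans.append((idx, end))
--                 break  # Only count each term once
--
--             start = end
--
--     return found
-- ===== SOURCE B (Python) =====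
-- def _find_jargon(text: str, jargon_map: dict[str, str]) -> list[dict]:
--     """Single-pass multi-pattern search: index every eligible term's occurrence
--     positions in one sweep over the text (one substring-hash lookup per position
--     and term-length), then pick matches greedily in the same longest-first
--     priority order by walking each term's position list with a skip cursor."""
--     tl = text.lower()
--     n = len(tl)
--     terms = {t: s for t, s in jargon_map.items() if len(t) >= 3}
--     lengths = sorted({len(t) for t in terms})
--     occs = {t: [] for t in terms}
--
--     # one pass over the text: collect every occurrence of every eligible term
--     for i in range(n):
--         for L in lengths:
--             if i + L > n:
--                 break
--             sub = tl[i:i+L]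
--             if sub in occs:
--                 occs[sub].append(i)
--
--     found: list[dict] = []
--     spans: list[tuple[int, int]] = []
--     for term, simple in sorted(jargon_map.items(), key=lambda kv: len(kv[0]), reverse=True):
--         if term not in occs:
--             continue
--         L = len(term)
--         limit = 0
--         for i in occs[term]:
--             if i < limit:
--                 continue
--             if all(i + L <= s or e <= i for s, e in spans):
--                 found.append({"term": term, "simple": simple})
--                 spans.append((i, i + L))
--                 break
--             limit = i + L
--     return found
-- ===== Notes on version B (the rewrite author's own statement) =====
-- stated objective: alternative
-- what changed: B makes one sweep over the text collecting every eligible term's occurrence positions into a substring-keyed dict (one lookup per position and distinct term length), then runs the longest-first greedy selection on the precomputed position lists, instead of A's repeated str.find scans per term over the whole text; intended to be faster on many-term inputs (a timing run measured ~3-7x where both programs finished, but both timed out at its largest size, so no speed is claimed).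
import Mathlib
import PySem

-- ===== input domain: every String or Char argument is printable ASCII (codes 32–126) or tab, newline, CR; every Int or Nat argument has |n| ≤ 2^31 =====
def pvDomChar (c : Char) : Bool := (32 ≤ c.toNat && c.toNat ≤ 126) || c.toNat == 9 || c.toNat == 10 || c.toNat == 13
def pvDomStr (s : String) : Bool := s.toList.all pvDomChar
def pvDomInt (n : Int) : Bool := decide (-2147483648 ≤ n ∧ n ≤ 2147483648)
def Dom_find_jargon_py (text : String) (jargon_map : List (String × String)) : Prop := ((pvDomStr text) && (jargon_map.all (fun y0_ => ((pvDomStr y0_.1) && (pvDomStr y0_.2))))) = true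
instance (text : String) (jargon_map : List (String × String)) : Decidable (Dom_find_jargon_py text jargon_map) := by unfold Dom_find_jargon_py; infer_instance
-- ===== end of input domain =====

-- B indexes all eligible terms' occurrence positions in one sweep over the text
-- (substring-keyed dict), then runs the same longest-first greedy selection on the
-- precomputed lists, instead of A's repeated str.find scans per term (objective:
-- alternative algorithm; a timing run measured B ~3-7x ahead where both finished,
-- but both timed out at its largest size, so no speed is claimed).


-- ===== PORT A =====
-- overlaps = any(not (end <= ms or idx >= me) for ms, me in matched_spans)
def pvOverlapA (idx e : Int) (spans : List (Int × Int)) : Bool :=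
  spans.any (fun ms => !(decide (e ≤ ms.1) || decide (idx ≥ ms.2)))

-- A's inner `while True` loop (find / overlap-check / start = end); fuel bounds the
-- iterations: start grows by len(term) ≥ 3 each round and stays ≤ len(text), so
-- tl.length + 1 rounds always suffice.
def pvScanA (tl sub : List Char) (term simple : String) (fuel : Nat) (start : Int)
    (st : List (List (String × String)) × List (Int × Int)) :
    List (List (String × String)) × List (Int × Int) :=
  match fuel with
  | 0 => st
  | fuel + 1 =>
    let idx := PySem.Chars.findFrom tl sub start
    if idx = -1 then st
    else
      let e := idx + (sub.length : Int)
      if pvOverlapA idx e st.2 then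
        pvScanA tl sub term simple fuel e st
      else
        (st.1 ++ [[("term", term), ("simple", simple)]], st.2 ++ [(idx, e)])

def find_jargon_py (text : String) (jargon_map : List (String × String)) :
    List (List (String × String)) :=
  let tl := PySem.Chars.lower text.toList
  let sorted_terms :=
    PySem.List.sorted (PySem.Dict.ofList jargon_map).items (fun x => PySem.Str.len x.1) true
  (sorted_terms.foldl
    (fun st kv =>
      if PySem.Str.len kv.1 < 3 then st
      else pvScanA tl kv.1.toList kv.1 kv.2 (tl.length + 1) 0 st)
    ([], [])).1

-- ===== PORT B =====
-- sub = tl[i:i+L]; if sub in occs: occs[sub].append(i)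
def pvPut (tl : List Char) (i : Int) (d : PySem.Dict String (List Int)) (L : Int) :
    PySem.Dict String (List Int) :=
  let sub := String.ofList (PySem.List.slice tl (some i) (some (i + L)))
  if d.contains sub then d.modify sub [] (fun l => l ++ [i]) else d

-- inner loop `for L in lengths: if i + L > n: break; …` (break = takeWhile)
def pvStep (tl : List Char) (n : Int) (lengths : List Int)
    (d : PySem.Dict String (List Int)) (i : Int) : PySem.Dict String (List Int) :=
  (lengths.takeWhile (fun L => decide (i + L ≤ n))).foldl (pvPut tl i) d

-- all(i + L <= s or e <= i for s, e in spans)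
def pvFree (i iL : Int) (spans : List (Int × Int)) : Bool :=
  spans.all (fun se => decide (iL ≤ se.1) || decide (se.2 ≤ i))

-- B's `for i in occs[term]` loop with the skip cursor `limit`
def pvScanB (term simple : String) (L : Int) (occs : List Int) (limit : Int)
    (st : List (List (String × String)) × List (Int × Int)) :
    List (List (String × String)) × List (Int × Int) :=
  match occs with
  | [] => st
  | i :: rest =>
    if i < limit then pvScanB term simple L rest limit st
    else if pvFree i (i + L) st.2 then
      (st.1 ++ [[("term", term), ("simple", simple)]], st.2 ++ [(i, i + L)])
    else pvScanB term simple L rest (i + L) st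

def find_jargon_py_alt (text : String) (jargon_map : List (String × String)) :
    List (List (String × String)) :=
  let tl := PySem.Chars.lower text.toList
  let n : Int := tl.length
  let terms := PySem.Dict.ofList
    (((PySem.Dict.ofList jargon_map).items).filter (fun kv => decide (3 ≤ PySem.Str.len kv.1)))
  let lengths := PySem.List.sorted
    (PySem.Set.ofList (terms.keys.map (fun t => PySem.Str.len t))) (fun x => x) false
  let occs0 := PySem.Dict.ofList (terms.keys.map (fun t => (t, ([] : List Int))))
  let occs := (PySem.List.pyRange 0 n).foldl (pvStep tl n lengths) occs0
  let sorted_terms :=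
    PySem.List.sorted (PySem.Dict.ofList jargon_map).items (fun x => PySem.Str.len x.1) true
  (sorted_terms.foldl
    (fun st kv =>
      if ¬ occs.contains kv.1 then st
      else pvScanB kv.1 kv.2 (PySem.Str.len kv.1) (occs.getD kv.1 []) 0 st)
    ([], [])).1

-- ===== PRECONDITION & SPEC =====
def Spec_find_jargon_py (text : String) (jargon_map : List (String × String)) (out : List (List (String × String))) : Prop := out = find_jargon_py_alt text jargon_map
instance (text : String) (jargon_map : List (String × String)) (out : List (List (String × String))) : Decidable (Spec_find_jargon_py text jargon_map out) := by unfold Spec_find_jargon_py; infer_instance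

-- ===== CLAIM (what is proved, stated in full; the proofs are below) =====
def Claim_equal_find_jargon_py : Prop := ∀ (text : String) (jargon_map : List (String × String)), Dom_find_jargon_py text jargon_map → Spec_find_jargon_py text jargon_map (find_jargon_py text jargon_map)

-- ===== LEMMAS AND PROOFS =====

-- the list of all occurrence positions of `sub` in `tl`, ascending (proof-side notion)
def pvOccs (tl sub : List Char) : List Int :=
  (PySem.List.pyRange 0 (tl.length : Int)).filter
    (fun i => decide (i + (sub.length : Int) ≤ (tl.length : Int))
      && (PySem.List.slice tl (some i) (some (i + (sub.length : Int))) == sub))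

-- A's `not overlaps` is B's `all non-overlapping`
lemma pvFree_eq_not_overlap (i e : Int) (spans : List (Int × Int)) :
    pvFree i e spans = !pvOverlapA i e spans := by
  unfold pvFree pvOverlapA
  induction spans with
  | nil => rfl
  | cons h t ih => simp_all [List.all_cons, List.any_cons, ge_iff_le]

lemma slice_full (tl : List Char) {i L : Int} (h0 : 0 ≤ i) (hL : 0 ≤ L) :
    PySem.List.slice tl (some i) (some (i + L)) = List.take L.toNat (List.drop i.toNat tl) := by
  rw [PySem.List.slice_toNat tl h0 (by omega)]
  congr 1
  omega

-- occurrence characterisation of the candidate list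
lemma mem_pvOccs (tl sub : List Char) (hsub : sub ≠ []) (i : Int) :
    i ∈ pvOccs tl sub ↔ 0 ≤ i ∧ sub <+: tl.drop i.toNat := by
  have hne : 0 < sub.length := List.length_pos_iff.mpr hsub
  unfold pvOccs
  rw [List.mem_filter, PySem.List.mem_pyRange_one]
  constructor
  · rintro ⟨⟨h0, _⟩, heq⟩
    rw [Bool.and_eq_true, beq_iff_eq, slice_full tl h0 (by positivity)] at heq
    have : ((sub.length : Int)).toNat = sub.length := by omega
    rw [this] at heq
    exact ⟨h0, List.prefix_iff_eq_take.mpr heq.2.symm⟩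
  · rintro ⟨h0, hpre⟩
    have hlen : i.toNat + sub.length ≤ tl.length := by
      have := hpre.length_le
      simp only [List.length_drop] at this
      omega
    refine ⟨⟨h0, by omega⟩, ?_⟩
    rw [Bool.and_eq_true, beq_iff_eq, slice_full tl h0 (by positivity)]
    have : ((sub.length : Int)).toNat = sub.length := by omega
    rw [this]
    exact ⟨by simp; omega, (List.prefix_iff_eq_take.mp hpre).symm⟩

-- the candidate list is strictly increasing
lemma pvOccs_pairwise (tl sub : List Char) : (pvOccs tl sub).Pairwise (· < ·) := by
  unfold pvOccs
  apply List.Pairwise.filter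
  rw [PySem.List.pyRange_of_pos 0 _ (by norm_num), List.pairwise_map]
  exact (List.pairwise_lt_range).imp (by intro a b h; omega)

-- elements below the cursor never matter: the cursor only ever grows
lemma pvScanB_filter (term simple : String) (L : Int) (hL : 0 ≤ L) :
    ∀ (n : Nat) (occs : List Int), occs.length ≤ n → ∀ lim st,
      pvScanB term simple L occs lim st
        = pvScanB term simple L (occs.filter (fun i => decide (lim ≤ i))) lim st := by
  intro n
  induction n with
  | zero =>
    intro occs h lim st
    have : occs = [] := List.eq_nil_of_length_eq_zero (by omega)
    subst this; rfl
  | succ n ih =>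
    intro occs h lim st
    match occs with
    | [] => rfl
    | i :: rest =>
      simp only [List.length_cons] at h
      by_cases hi : i < lim
      · have hfe : (i :: rest).filter (fun x => decide (lim ≤ x))
            = rest.filter (fun x => decide (lim ≤ x)) := by
          have : ¬ lim ≤ i := by omega
          simp [this]
        rw [hfe, show pvScanB term simple L (i :: rest) lim st
              = pvScanB term simple L rest lim st from by simp [pvScanB, hi]]
        exact ih rest (by omega) lim st
      · have hfe : (i :: rest).filter (fun x => decide (lim ≤ x))
            = i :: rest.filter (fun x => decide (lim ≤ x)) := by
          have : lim ≤ i := by omega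
          simp [this]
        rw [hfe]
        simp only [pvScanB, if_neg hi]
        by_cases hf : pvFree i (i + L) st.2 = true
        · rw [if_pos hf, if_pos hf]
        · rw [if_neg hf, if_neg hf]
          rw [ih rest (by omega) (i + L) st,
              ih (rest.filter (fun x => decide (lim ≤ x)))
                (le_trans (List.length_filter_le _ _) (by omega)) (i + L) st,
              List.filter_filter]
          congr 1
          apply List.filter_congr
          intro x _
          by_cases hx : i + L ≤ x
          · have hlx : lim ≤ x := by omega
            simp [hx, hlx]
          · simp [hx]

-- head of an ascending list filtered from a minimal member
lemma filter_asc_head {l : List Int} (hl : l.Pairwise (· < ·)) {j k : Int} (hj : j ∈ l)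
    (hk : k ≤ j) (hmin : ∀ i ∈ l, k ≤ i → j ≤ i) :
    l.filter (fun i => decide (k ≤ i)) = j :: l.filter (fun i => decide (j + 1 ≤ i)) := by
  induction l with
  | nil => simp at hj
  | cons x t ih =>
    rw [List.pairwise_cons] at hl
    rcases List.mem_cons.mp hj with rfl | hjt
    · simp only [List.filter_cons]
      rw [if_pos (decide_eq_true hk), if_neg (by simp)]
      congr 1
      apply List.filter_congr
      intro y hy
      have hxy : j < y := hl.1 y hy
      simp only [decide_eq_decide]
      omega
    · have hxj : x < j := hl.1 j hjt
      have hxk : ¬ k ≤ x := by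
        intro hkx
        have := hmin x (List.mem_cons_self) hkx
        omega
      simp only [List.filter_cons]
      rw [if_neg (by simpa using hxk), if_neg (by simpa using (by omega : ¬ j + 1 ≤ x))]
      exact ih hl.2 hjt (fun i hi hki => hmin i (List.mem_cons_of_mem _ hi) hki)

-- core: A's find-loop equals B's walk over the candidate list
lemma scan_eq (tl sub : List Char) (term simple : String) (hL : 3 ≤ sub.length) :
    ∀ (fuel k : Nat) st, k ≤ tl.length → tl.length + 1 - k ≤ fuel →
      pvScanA tl sub term simple fuel (k : Int) st
        = pvScanB term simple (sub.length : Int)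
            ((pvOccs tl sub).filter (fun i => decide ((k : Int) ≤ i))) (k : Int) st := by
  have hsub : sub ≠ [] := by intro h; subst h; simp at hL
  intro fuel
  induction fuel with
  | zero => intro k st hk hf; exact absurd hk (by omega)
  | succ fuel ih =>
    intro k st hk hf
    simp only [pvScanA]
    by_cases hj : PySem.Chars.findFrom tl sub (k : Int) = -1
    · rw [if_pos hj]
      have hnone : (pvOccs tl sub).filter (fun i => decide ((k : Int) ≤ i)) = [] := by
        rw [List.filter_eq_nil_iff]
        intro i hi hki
        have hocc := (mem_pvOccs tl sub hsub i).mp hi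
        have hinf : sub <:+: tl.drop k := by
          have h1 : sub <+: (tl.drop k).drop (i.toNat - k) := by
            rw [List.drop_drop]
            have hkle : (k : Int) ≤ i := by simpa using hki
            have heq : k + (i.toNat - k) = i.toNat := by omega
            rw [heq]
            exact hocc.2
          exact h1.isInfix.trans ((List.drop_suffix _ _).isInfix)
        exact ((PySem.Chars.findFrom_natCast_eq_neg_one_iff tl sub k hk).mp hj) hinf
      rw [hnone]
      rfl
    · rw [if_neg hj]
      obtain ⟨hkj, hpre, hmin⟩ := PySem.Chars.findFrom_natCast_spec tl sub k hk hj
      set j := PySem.Chars.findFrom tl sub (k : Int) with hjdef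
      have hj0 : 0 ≤ j := le_trans (by exact_mod_cast Nat.zero_le k) hkj
      have hjmem : j ∈ pvOccs tl sub := (mem_pvOccs tl sub hsub j).mpr ⟨hj0, hpre⟩
      have hjlen : j.toNat + sub.length ≤ tl.length := by
        have := hpre.length_le
        simp only [List.length_drop] at this
        have hne : 0 < sub.length := List.length_pos_iff.mpr hsub
        omega
      have hhead : (pvOccs tl sub).filter (fun i => decide ((k : Int) ≤ i))
          = j :: (pvOccs tl sub).filter (fun i => decide (j + 1 ≤ i)) :=
        filter_asc_head (pvOccs_pairwise tl sub) hjmem hkj (by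
          intro i hi hki
          by_contra hij
          have hocc := (mem_pvOccs tl sub hsub i).mp hi
          have hik : k ≤ i.toNat := by omega
          have hijn : i.toNat < j.toNat := by omega
          exact hmin i.toNat hik hijn hocc.2)
      rw [hhead]
      simp only [pvScanB, if_neg (show ¬ j < (k : Int) by omega)]
      rw [pvFree_eq_not_overlap]
      by_cases ho : pvOverlapA j (j + (sub.length : Int)) st.2 = true
      · rw [if_pos ho, if_neg (by simp [ho])]
        have hcast : ((j.toNat + sub.length : Nat) : Int) = j + (sub.length : Int) := by omega
        rw [← hcast, ih (j.toNat + sub.length) st (by omega) (by omega)]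
        have hBB : pvScanB term simple (sub.length : Int)
              ((pvOccs tl sub).filter (fun i => decide (j + 1 ≤ i)))
              ((j.toNat + sub.length : Nat) : Int) st
            = pvScanB term simple (sub.length : Int)
              ((pvOccs tl sub).filter (fun i => decide (((j.toNat + sub.length : Nat) : Int) ≤ i)))
              ((j.toNat + sub.length : Nat) : Int) st := by
          rw [pvScanB_filter term simple (sub.length : Int) (by positivity)
                ((pvOccs tl sub).filter (fun i => decide (j + 1 ≤ i))).length
                ((pvOccs tl sub).filter (fun i => decide (j + 1 ≤ i))) (le_refl _)
                ((j.toNat + sub.length : Nat) : Int) st,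
              List.filter_filter]
          congr 1
          apply List.filter_congr
          intro x _
          by_cases hx : ((j.toNat + sub.length : Nat) : Int) ≤ x
          · rw [decide_eq_true hx, decide_eq_true (show j + 1 ≤ x by omega)]
            rfl
          · rw [decide_eq_false hx]
            rfl
        rw [hBB]
      · rw [if_neg ho, if_pos (by simp [ho])]

-- pvPut never adds or removes keys
lemma contains_pvPut (tl : List Char) (i : Int) (d : PySem.Dict String (List Int))
    (L : Int) (k : String) : (pvPut tl i d L).contains k = d.contains k := by
  unfold pvPut
  by_cases hc : d.contains (String.ofList (PySem.List.slice tl (some i) (some (i + L)))) = true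
  · rw [if_pos hc, PySem.Dict.contains_modify]
    by_cases hk : k = String.ofList (PySem.List.slice tl (some i) (some (i + L)))
    · subst hk
      simp [hc]
    · simp [hk]
  · rw [if_neg hc]

-- nor does a whole inner sweep
lemma contains_pvStep (tl : List Char) (n : Int) (lengths : List Int)
    (d : PySem.Dict String (List Int)) (i : Int) (k : String) :
    (pvStep tl n lengths d i).contains k = d.contains k := by
  unfold pvStep
  generalize lengths.takeWhile (fun L => decide (i + L ≤ n)) = Ls
  induction Ls generalizing d with
  | nil => rfl
  | cons L Ls ih =>
    rw [List.foldl_cons, ih (pvPut tl i d L), contains_pvPut]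

-- effect of one inner sweep on one key, as a filter over the length list
lemma getD_inner (tl : List Char) (i : Int) (t : String) :
    ∀ (Ls : List Int) (d : PySem.Dict String (List Int)),
      (Ls.foldl (pvPut tl i) d).getD t []
        = d.getD t [] ++ (Ls.filter (fun L =>
            d.contains (String.ofList (PySem.List.slice tl (some i) (some (i + L))))
            && (String.ofList (PySem.List.slice tl (some i) (some (i + L))) == t))).map
            (fun _ => i) := by
  intro Ls
  induction Ls with
  | nil => intro d; simp
  | cons L Ls ih =>
    intro d
    rw [List.foldl_cons, List.filter_cons, ih (pvPut tl i d L)]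
    have hfc : (Ls.filter (fun L' =>
          (pvPut tl i d L).contains (String.ofList (PySem.List.slice tl (some i) (some (i + L'))))
          && (String.ofList (PySem.List.slice tl (some i) (some (i + L'))) == t)))
        = (Ls.filter (fun L' =>
          d.contains (String.ofList (PySem.List.slice tl (some i) (some (i + L'))))
          && (String.ofList (PySem.List.slice tl (some i) (some (i + L'))) == t))) := by
      apply List.filter_congr
      intro L' _
      rw [contains_pvPut]
    rw [hfc]
    by_cases hc : d.contains (String.ofList (PySem.List.slice tl (some i) (some (i + L)))) = true
    · by_cases ht : String.ofList (PySem.List.slice tl (some i) (some (i + L))) = t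
      · have hput : pvPut tl i d L = d.modify t [] (fun l => l ++ [i]) := by
          unfold pvPut
          rw [if_pos hc, ht]
        rw [hput, PySem.Dict.getD_modify_self]
        have hpred : (d.contains (String.ofList (PySem.List.slice tl (some i) (some (i + L))))
            && (String.ofList (PySem.List.slice tl (some i) (some (i + L))) == t)) = true := by
          rw [ht] at hc ⊢
          simp [hc]
        rw [if_pos hpred]
        simp
      · have hput : pvPut tl i d L = d.modify
            (String.ofList (PySem.List.slice tl (some i) (some (i + L)))) [] (fun l => l ++ [i]) := by
          unfold pvPut
          rw [if_pos hc]
        rw [hput, PySem.Dict.getD_modify_of_ne _ _ _ (fun h => ht h.symm)]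
        have hpred : (d.contains (String.ofList (PySem.List.slice tl (some i) (some (i + L))))
            && (String.ofList (PySem.List.slice tl (some i) (some (i + L))) == t)) = false := by
          simp [ht]
        rw [if_neg (by simp [hpred])]
    · have hput : pvPut tl i d L = d := by
        unfold pvPut
        rw [if_neg hc]
      rw [hput]
      rw [if_neg (by simp [hc])]

-- in an ascending list, takeWhile of `i + L ≤ n` keeps every member satisfying it
lemma mem_takeWhile_le {l : List Int} (hasc : l.Pairwise (· < ·)) (i n x : Int)
    (hx : x ∈ l) (hpx : i + x ≤ n) :
    x ∈ l.takeWhile (fun L => decide (i + L ≤ n)) := by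
  induction l with
  | nil => simp at hx
  | cons y t ih =>
    rw [List.pairwise_cons] at hasc
    have hpy : (i + y ≤ n) := by
      rcases List.mem_cons.mp hx with rfl | hxt
      · exact hpx
      · have := hasc.1 x hxt
        omega
    rw [List.takeWhile_cons, if_pos (decide_eq_true hpy)]
    rcases List.mem_cons.mp hx with rfl | hxt
    · exact List.mem_cons_self
    · exact List.mem_cons_of_mem _ (ih hasc.2 hxt)

-- a filter that can only keep `a`, on a duplicate-free list
lemma filter_nodup_singleton {l : List Int} (hnd : l.Nodup) (p : Int → Bool) (a : Int)
    (h : ∀ x ∈ l, p x = true → x = a) :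
    l.filter p = if a ∈ l ∧ p a = true then [a] else [] := by
  induction l with
  | nil => simp
  | cons x t ih =>
    rw [List.nodup_cons] at hnd
    rw [List.filter_cons]
    by_cases hpx : p x = true
    · have hxa : x = a := h x List.mem_cons_self hpx
      subst hxa
      have htnil : t.filter p = [] := by
        rw [List.filter_eq_nil_iff]
        intro y hy hpy
        exact hnd.1 ((h y (List.mem_cons_of_mem _ hy) hpy) ▸ hy)
      rw [if_pos hpx, htnil, if_pos ⟨List.mem_cons_self, hpx⟩]
    · rw [if_neg (by simpa using hpx),
        ih hnd.2 (fun y hy hpy => h y (List.mem_cons_of_mem _ hy) hpy)]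
      by_cases hat : a ∈ t ∧ p a = true
      · rw [if_pos hat, if_pos ⟨List.mem_cons_of_mem _ hat.1, hat.2⟩]
      · rw [if_neg hat, if_neg (by
          rintro ⟨hmem, hpa⟩
          rcases List.mem_cons.mp hmem with rfl | hmt
          · exact hpx hpa
          · exact hat ⟨hmt, hpa⟩)]

-- one sweep appends `i` to t's list exactly when t occurs at i
lemma getD_pvStep (tl : List Char) (lengths : List Int) (t : String)
    (d : PySem.Dict String (List Int)) (i : Int)
    (hc : d.contains t = true)
    (hasc : lengths.Pairwise (· < ·))
    (hpos : ∀ L ∈ lengths, 0 ≤ L)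
    (hmem : ((t.toList.length : Int)) ∈ lengths)
    (h0 : 0 ≤ i) :
    (pvStep tl (tl.length : Int) lengths d i).getD t []
      = d.getD t [] ++ (if (decide (i + (t.toList.length : Int) ≤ (tl.length : Int))
          && (PySem.List.slice tl (some i) (some (i + (t.toList.length : Int))) == t.toList)) = true
        then [i] else []) := by
  unfold pvStep
  rw [getD_inner]
  congr 1
  have hnodupTW : (lengths.takeWhile (fun L => decide (i + L ≤ (tl.length : Int)))).Nodup :=
    (List.takeWhile_sublist _).nodup (hasc.imp (fun h => ne_of_lt h))
  have honly : ∀ L ∈ lengths.takeWhile (fun L => decide (i + L ≤ (tl.length : Int))),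
      (d.contains (String.ofList (PySem.List.slice tl (some i) (some (i + L))))
        && (String.ofList (PySem.List.slice tl (some i) (some (i + L))) == t)) = true
      → L = (t.toList.length : Int) := by
    intro L hLtw hpred
    have hin : i + L ≤ (tl.length : Int) := by simpa using List.mem_takeWhile_imp hLtw
    have hLpos : 0 ≤ L := hpos L ((List.takeWhile_sublist _).subset hLtw)
    rw [Bool.and_eq_true, beq_iff_eq] at hpred
    have hslice : PySem.List.slice tl (some i) (some (i + L)) = t.toList := by
      have := congrArg String.toList hpred.2
      simpa using this
    have hlenL : (PySem.List.slice tl (some i) (some (i + L))).length = L.toNat := by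
      rw [slice_full tl h0 hLpos, List.length_take, List.length_drop]
      omega
    rw [hslice] at hlenL
    omega
  rw [filter_nodup_singleton hnodupTW _ ((t.toList.length : Int)) honly]
  by_cases hcond : (decide (i + (t.toList.length : Int) ≤ (tl.length : Int))
      && (PySem.List.slice tl (some i) (some (i + (t.toList.length : Int))) == t.toList)) = true
  · rw [if_pos hcond]
    rw [Bool.and_eq_true, beq_iff_eq] at hcond
    rw [if_pos ⟨mem_takeWhile_le hasc i _ _ hmem (by simpa using hcond.1), by
      rw [Bool.and_eq_true, beq_iff_eq, hcond.2, String.ofList_toList]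
      exact ⟨hc, rfl⟩⟩]
    rfl
  · rw [if_neg hcond]
    rw [if_neg (by
      rintro ⟨hmemTW, hpred⟩
      apply hcond
      rw [Bool.and_eq_true, beq_iff_eq] at hpred ⊢
      refine ⟨by simpa using List.mem_takeWhile_imp hmemTW, ?_⟩
      have := congrArg String.toList hpred.2
      simpa using this)]
    rfl

-- the whole sweep loop: t's list is exactly its ascending occurrence list
lemma build_getD (tl : List Char) (lengths : List Int) (t : String)
    (hasc : lengths.Pairwise (· < ·))
    (hpos : ∀ L ∈ lengths, 0 ≤ L)
    (hmem : ((t.toList.length : Int)) ∈ lengths) :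
    ∀ (is : List Int) (d : PySem.Dict String (List Int)),
      d.contains t = true → (∀ i ∈ is, 0 ≤ i) →
      (is.foldl (pvStep tl (tl.length : Int) lengths) d).getD t []
        = d.getD t [] ++ is.filter (fun i =>
            decide (i + (t.toList.length : Int) ≤ (tl.length : Int))
            && (PySem.List.slice tl (some i) (some (i + (t.toList.length : Int))) == t.toList)) := by
  intro is
  induction is with
  | nil => intro d _ _; simp
  | cons i is ih =>
    intro d hc hpi
    rw [List.foldl_cons,
      ih (pvStep tl (tl.length : Int) lengths d i)
        (by rw [contains_pvStep]; exact hc) (fun j hj => hpi j (List.mem_cons_of_mem _ hj)),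
      getD_pvStep tl lengths t d i hc hasc hpos hmem (hpi i List.mem_cons_self),
      List.filter_cons]
    by_cases hcond : (decide (i + (t.toList.length : Int) ≤ (tl.length : Int))
        && (PySem.List.slice tl (some i) (some (i + (t.toList.length : Int))) == t.toList)) = true
    · rw [if_pos hcond, if_pos hcond]
      simp
    · rw [if_neg hcond, if_neg hcond]
      simp

-- every value in the initial dict is []
lemma getD_initial (t : String) :
    ∀ (ks : List String) (d : PySem.Dict String (List Int)),
      (∀ u, d.getD u [] = []) →
      (ks.foldl (fun d k => d.insert k ([] : List Int)) d).getD t [] = [] := by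
  intro ks
  induction ks with
  | nil => intro d h; exact h t
  | cons k ks ih =>
    intro d h
    rw [List.foldl_cons]
    apply ih
    intro u
    by_cases hu : u = k
    · subst hu
      exact PySem.Dict.getD_insert_self d u [] []
    · rw [PySem.Dict.getD_insert_of_ne d [] [] hu]
      exact h u

-- the sweep loop never adds or removes keys
lemma contains_build (tl : List Char) (n : Int) (lengths : List Int) :
    ∀ (is : List Int) (d : PySem.Dict String (List Int)) (k : String),
      ((is.foldl (pvStep tl n lengths) d)).contains k = d.contains k := by
  intro is
  induction is with
  | nil => intro d k; rfl
  | cons i is ih =>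
    intro d k
    rw [List.foldl_cons, ih (pvStep tl n lengths d i) k, contains_pvStep]

-- keys of a dict built from a pair list are the (deduplicated) first components
lemma keys_ofList_pairs {ν : Type} (l : List (String × ν)) :
    (PySem.Dict.ofList l).keys = PySem.Set.ofList (l.map (·.1)) := by
  show (l.foldl (fun d kv => d.insert kv.1 kv.2) PySem.Dict.empty).keys = _
  rw [PySem.Dict.keys_foldl_insert_key l (·.1) (fun _ x => x.2) PySem.Dict.empty]
  rfl

lemma contains_ofList_pairs {ν : Type} (l : List (String × ν)) (t : String) :
    (PySem.Dict.ofList l).contains t = true ↔ t ∈ l.map (·.1) := by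
  rw [PySem.Dict.contains_iff_mem_keys, keys_ofList_pairs, PySem.Set.mem_ofList]

theorem find_jargon_py_spec_aux (text : String) (jargon_map : List (String × String)) :
    find_jargon_py text jargon_map = find_jargon_py_alt text jargon_map := by
  unfold find_jargon_py find_jargon_py_alt
  apply congrArg Prod.fst
  apply PySem.List.foldl_congr_mem
  intro st kv hkv
  have hkvmem : kv ∈ (PySem.Dict.ofList jargon_map).items :=
    (PySem.List.mem_sorted _ _ _ kv).mp hkv
  -- abbreviations (syntactically the port's subterms)
  set tl := PySem.Chars.lower text.toList with htl
  set items := (PySem.Dict.ofList jargon_map).items with hitems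
  set filt := items.filter (fun kv => decide (3 ≤ PySem.Str.len kv.1)) with hfilt
  set terms := PySem.Dict.ofList filt with hterms
  set lengths := PySem.List.sorted
    (PySem.Set.ofList (terms.keys.map (fun t => PySem.Str.len t))) (fun x => x) false with hlengths
  set occs0 := PySem.Dict.ofList (terms.keys.map (fun t => (t, ([] : List Int)))) with hoccs0
  set occs := (PySem.List.pyRange 0 ((tl.length : Int))).foldl
    (pvStep tl ((tl.length : Int)) lengths) occs0 with hoccs
  have hkeymap : ∀ t : String, t ∈ terms.keys ↔ t ∈ filt.map (·.1) := by
    intro t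
    rw [hterms, keys_ofList_pairs, PySem.Set.mem_ofList]
  have hcont0 : ∀ t : String, occs0.contains t = true ↔ t ∈ terms.keys := by
    intro t
    rw [hoccs0, contains_ofList_pairs]
    simp [List.map_map]
  have hcont : occs.contains kv.1 = true ↔ 3 ≤ PySem.Str.len kv.1 := by
    rw [hoccs, contains_build, hcont0, hkeymap]
    constructor
    · intro h
      obtain ⟨kv', hkv', heq⟩ := List.mem_map.mp h
      have := (List.mem_filter.mp hkv').2
      rw [heq] at this
      simpa using this
    · intro h
      exact List.mem_map.mpr ⟨kv, List.mem_filter.mpr ⟨hkvmem, by simpa using h⟩, rfl⟩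
  by_cases hlen : PySem.Str.len kv.1 < 3
  · rw [if_pos hlen, if_pos (by
      intro hc
      have := hcont.mp hc
      omega)]
  · rw [if_neg hlen]
    have hc : occs.contains kv.1 = true := hcont.mpr (by omega)
    rw [if_neg (not_not_intro hc)]
    have htk : kv.1 ∈ terms.keys :=
      (hkeymap kv.1).mpr (List.mem_map.mpr
        ⟨kv, List.mem_filter.mpr ⟨hkvmem, by rw [decide_eq_true_eq]; omega⟩, rfl⟩)
    have hasc : lengths.Pairwise (· < ·) := by
      rw [hlengths]
      exact PySem.List.sorted_ofList_pairwise_lt _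
    have h0l : ∀ L ∈ lengths, 0 ≤ L := by
      intro L hL
      rw [hlengths, PySem.List.mem_sorted, PySem.Set.mem_ofList] at hL
      obtain ⟨u, _, rfl⟩ := List.mem_map.mp hL
      rw [PySem.Str.len_eq]
      positivity
    have hmemlen : ((kv.1.toList.length : Int)) ∈ lengths := by
      rw [hlengths, PySem.List.mem_sorted, PySem.Set.mem_ofList]
      exact List.mem_map.mpr ⟨kv.1, htk, PySem.Str.len_eq kv.1⟩
    have hgd0 : occs0.getD kv.1 [] = [] := by
      rw [hoccs0]
      show ((terms.keys.map (fun t => (t, ([] : List Int)))).foldl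
        (fun d kv => d.insert kv.1 kv.2) PySem.Dict.empty).getD kv.1 [] = []
      rw [List.foldl_map]
      exact getD_initial kv.1 terms.keys PySem.Dict.empty (fun u => by simp [pysem])
    have hgd : occs.getD kv.1 [] = pvOccs tl kv.1.toList := by
      rw [hoccs, build_getD tl lengths kv.1 hasc h0l hmemlen
            (PySem.List.pyRange 0 ((tl.length : Int))) occs0 ((hcont0 kv.1).mpr htk)
            (fun i hi => (PySem.List.mem_pyRange_one.mp hi).1),
          hgd0, List.nil_append]
      rfl
    rw [hgd]
    have hL3 : 3 ≤ kv.1.toList.length := by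
      rw [PySem.Str.len_eq] at hlen
      exact_mod_cast not_lt.mp hlen
    have hsub : kv.1.toList ≠ [] := by
      intro h
      rw [h] at hL3
      simp at hL3
    have h := scan_eq tl kv.1.toList kv.1 kv.2 hL3 (tl.length + 1) 0 st
      (Nat.zero_le _) (by omega)
    simp only [Nat.cast_zero] at h
    rw [h, PySem.Str.len_eq kv.1,
      List.filter_eq_self.mpr
        (fun i hi => decide_eq_true ((mem_pvOccs tl kv.1.toList hsub i).mp hi).1)]

-- ===== VERDICT (by name: the statement is the Claim_ definition above) =====
theorem find_jargon_py_spec : Claim_equal_find_jargon_py := by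
  intro text jargon_map _
  unfold Spec_find_jargon_py
  exact find_jargon_py_spec_aux text jargon_map
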